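-- pv_equiv track=rewrite | github.com/paralab/SymPyGR | dendrosym/general_configs.py | create_grad_var_names
-- ===== SOURCE A (Python) =====
-- def create_grad_var_names(
--     in_vars: list, grad_type="grad", ndim=3, assume_symmetry=True
-- ):
--     """Generate the gradient variable names
--
--     This also takes in the gradient type, which is specifically for
--     generating the full list of gradient variable names.
--
--     Notes
--     -----
--     TODO: this might not be entirely necessary, there is a backup
--     method that scans the output code for the gradient types, but
--     at least this way we can generate the actual gradient names
--     based on the full list.
--     """
--
--     grad_vars = []
--
--     # 1d gradient
--     if grad_type == "grad":
--         for curr_var in in_vars: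
--             for ii in range(ndim):
--                 grad_vars.append(f"grad_{ii}_{curr_var}")
--     # 2d gradient
--     elif grad_type == "grad2":
--         for curr_var in in_vars:
--             collected_dirs = []
--             for ii in range(ndim):
--                 for jj in range(ndim):
--                     if assume_symmetry:
--                         if (jj, ii) in collected_dirs:
--                             continue
--
--                     grad_vars.append(f"grad2_{ii}_{jj}_{curr_var}")
--
--                     collected_dirs.append((ii, jj))
--
--     # advective gradient variables
--     elif grad_type == "agrad":
--         for curr_var in in_vars:
--             for ii in range(ndim):
--                 grad_vars.append(f"agrad_{ii}_{curr_var}")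
--
--     return grad_vars
-- ===== SOURCE B (Python) =====
-- def create_grad_var_names(
--     in_vars: list, grad_type="grad", ndim=3, assume_symmetry=True
-- ):
--     if grad_type == "grad":
--         return [f"grad_{ii}_{v}" for v in in_vars for ii in range(ndim)]
--     if grad_type == "grad2":
--         return [
--             f"grad2_{ii}_{jj}_{v}"
--             for v in in_vars
--             for ii in range(ndim)
--             for jj in range(ii if assume_symmetry else 0, ndim)
--         ]
--     if grad_type == "agrad":
--         return [f"agrad_{ii}_{v}" for v in in_vars for ii in range(ndim)]
--     return []
-- ===== Notes on version B (the rewrite author's own statement) =====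
-- stated objective: simpler
-- what changed: Replaced the grad2 branch's collected_dirs list and quadratic membership test with direct range arithmetic (jj iterates from ii when assume_symmetry, else from 0) and turned all three branches into flat comprehensions, removing the auxiliary collection entirely.
import Mathlib
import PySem

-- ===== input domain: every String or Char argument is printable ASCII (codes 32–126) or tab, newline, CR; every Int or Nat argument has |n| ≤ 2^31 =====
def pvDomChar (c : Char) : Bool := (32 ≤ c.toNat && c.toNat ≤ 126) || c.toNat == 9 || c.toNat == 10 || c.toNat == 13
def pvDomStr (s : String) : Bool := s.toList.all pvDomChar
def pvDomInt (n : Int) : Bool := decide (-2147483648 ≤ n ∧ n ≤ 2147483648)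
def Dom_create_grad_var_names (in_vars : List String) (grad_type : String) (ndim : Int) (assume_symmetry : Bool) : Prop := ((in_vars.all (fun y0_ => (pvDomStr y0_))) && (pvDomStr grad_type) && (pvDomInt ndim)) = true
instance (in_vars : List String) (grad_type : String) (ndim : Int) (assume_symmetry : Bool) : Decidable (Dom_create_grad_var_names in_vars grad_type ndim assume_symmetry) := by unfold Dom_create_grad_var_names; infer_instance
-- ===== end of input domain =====

-- B replaces A's collected_dirs bookkeeping in the grad2 branch with direct range arithmetic
-- (jj from ii when symmetric) and flat comprehensions in every branch: simpler, same output.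

-- ===== PORT A =====
-- inner jj-loop of A's grad2 branch, carrying (grad_vars, collected_dirs)
def cgvA_grad2_row (curr : String) (assume_symmetry : Bool) (ndim : Int)
    (st : List String × List (Int × Int)) (ii : Int) : List String × List (Int × Int) :=
  (PySem.List.pyRange 0 ndim 1).foldl (fun st jj =>
    if assume_symmetry && st.2.contains (jj, ii) then st
    else (st.1 ++ ["grad2_" ++ PySem.Int.toStr ii ++ "_" ++ PySem.Int.toStr jj ++ "_" ++ curr],
          st.2 ++ [(ii, jj)])) st

def create_grad_var_names (in_vars : List String) (grad_type : String) (ndim : Int) (assume_symmetry : Bool) : List String :=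
  if grad_type = "grad" then
    in_vars.foldl (fun gv curr =>
      (PySem.List.pyRange 0 ndim 1).foldl (fun gv ii =>
        gv ++ ["grad_" ++ PySem.Int.toStr ii ++ "_" ++ curr]) gv) []
  else if grad_type = "grad2" then
    in_vars.foldl (fun gv curr =>
      ((PySem.List.pyRange 0 ndim 1).foldl (cgvA_grad2_row curr assume_symmetry ndim)
        (gv, ([] : List (Int × Int)))).1) []
  else if grad_type = "agrad" then
    in_vars.foldl (fun gv curr =>
      (PySem.List.pyRange 0 ndim 1).foldl (fun gv ii =>
        gv ++ ["agrad_" ++ PySem.Int.toStr ii ++ "_" ++ curr]) gv) []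
  else []

-- ===== PORT B =====
def create_grad_var_names_alt (in_vars : List String) (grad_type : String) (ndim : Int) (assume_symmetry : Bool) : List String :=
  if grad_type = "grad" then
    in_vars.flatMap (fun v => (PySem.List.pyRange 0 ndim 1).map (fun ii =>
      "grad_" ++ PySem.Int.toStr ii ++ "_" ++ v))
  else if grad_type = "grad2" then
    in_vars.flatMap (fun v => (PySem.List.pyRange 0 ndim 1).flatMap (fun ii =>
      (PySem.List.pyRange (if assume_symmetry then ii else 0) ndim 1).map (fun jj =>
        "grad2_" ++ PySem.Int.toStr ii ++ "_" ++ PySem.Int.toStr jj ++ "_" ++ v)))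
  else if grad_type = "agrad" then
    in_vars.flatMap (fun v => (PySem.List.pyRange 0 ndim 1).map (fun ii =>
      "agrad_" ++ PySem.Int.toStr ii ++ "_" ++ v))
  else []

-- ===== PRECONDITION & SPEC =====
def Spec_create_grad_var_names (in_vars : List String) (grad_type : String) (ndim : Int) (assume_symmetry : Bool) (out : List String) : Prop := out = create_grad_var_names_alt in_vars grad_type ndim assume_symmetry
instance (in_vars : List String) (grad_type : String) (ndim : Int) (assume_symmetry : Bool) (out : List String) : Decidable (Spec_create_grad_var_names in_vars grad_type ndim assume_symmetry out) := by unfold Spec_create_grad_var_names; infer_instance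

-- ===== CLAIM (what is proved, stated in full; the proofs are below) =====
def Claim_equal_create_grad_var_names : Prop := ∀ (in_vars : List String) (grad_type : String) (ndim : Int) (assume_symmetry : Bool), Dom_create_grad_var_names in_vars grad_type ndim assume_symmetry → Spec_create_grad_var_names in_vars grad_type ndim assume_symmetry (create_grad_var_names in_vars grad_type ndim assume_symmetry)

-- ===== LEMMAS AND PROOFS =====

-- the string emitted for the (ii, jj, curr) grad2 entry
def cgvS2 (curr : String) (ii jj : Int) : String :=
  "grad2_" ++ PySem.Int.toStr ii ++ "_" ++ PySem.Int.toStr jj ++ "_" ++ curr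

-- B's per-variable grad2 output
def cgvB_var (curr : String) (assume_symmetry : Bool) (ndim : Int) : List String :=
  (PySem.List.pyRange 0 ndim 1).flatMap (fun ii =>
    (PySem.List.pyRange (if assume_symmetry then ii else 0) ndim 1).map (fun jj => cgvS2 curr ii jj))

-- a fold appending a single element to both components of a pair = two maps
lemma foldl_pair_append_singleton {α β γ : Type} (f : γ → α) (g : γ → β) :
    ∀ (L : List γ) (st : List α × List β),
      L.foldl (fun st x => (st.1 ++ [f x], st.2 ++ [g x])) st
        = (st.1 ++ L.map f, st.2 ++ L.map g) := by
  intro L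
  induction L with
  | nil => intro st; simp
  | cons x L ih => intro st; simp [ih]

-- a fold appending to both components of a pair = two flatMaps
lemma foldl_pair_append {α β γ : Type} (F : γ → List α) (G : γ → List β) :
    ∀ (L : List γ) (st : List α × List β),
      L.foldl (fun st x => (st.1 ++ F x, st.2 ++ G x)) st
        = (st.1 ++ L.flatMap F, st.2 ++ L.flatMap G) := by
  intro L
  induction L with
  | nil => intro st; simp
  | cons x L ih => intro st; simp [ih]

-- pyRange 0 n 1 restricted to k ≤ · is pyRange k n 1
lemma filter_pyRange_le (k n : Int) (hk : 0 ≤ k) (hkn : k ≤ n) :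
    (PySem.List.pyRange 0 n 1).filter (fun jj => decide (k ≤ jj))
      = PySem.List.pyRange k n 1 := by
  rw [PySem.List.pyRange_one_append 0 k n hk hkn, List.filter_append]
  have h1 : (PySem.List.pyRange 0 k 1).filter (fun jj => decide (k ≤ jj)) = [] := by
    apply List.filter_eq_nil_iff.mpr
    intro a ha
    have := (PySem.List.mem_pyRange_one).1 ha
    simp; omega
  have h2 : (PySem.List.pyRange k n 1).filter (fun jj => decide (k ≤ jj))
      = PySem.List.pyRange k n 1 := by
    apply List.filter_eq_self.mpr
    intro a ha
    have := (PySem.List.mem_pyRange_one).1 ha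
    simp; omega
  rw [h1, h2, List.nil_append]

-- A's symmetric inner loop over a duplicate-free column list whose collected set
-- decides membership exactly at "jj < ii": it emits exactly the columns ≥ ii.
lemma cgvA_inner_sym (curr : String) (ii : Int) :
    ∀ (L : List Int) (st : List String × List (Int × Int)),
      L.Nodup →
      (∀ jj ∈ L, ((jj, ii) ∈ st.2 ↔ jj < ii)) →
      L.foldl (fun st jj =>
          if st.2.contains (jj, ii) then st
          else (st.1 ++ ["grad2_" ++ PySem.Int.toStr ii ++ "_" ++ PySem.Int.toStr jj ++ "_" ++ curr],
                st.2 ++ [(ii, jj)])) st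
        = (st.1 ++ (L.filter (fun jj => decide (ii ≤ jj))).map (fun jj => cgvS2 curr ii jj),
           st.2 ++ (L.filter (fun jj => decide (ii ≤ jj))).map (fun jj => (ii, jj))) := by
  intro L
  induction L with
  | nil => intro st _ _; simp
  | cons jj L ih =>
    intro st hnd hmem
    have hjj := hmem jj (by simp)
    by_cases h : jj < ii
    · have hc : st.2.contains (jj, ii) = true := by simpa using hjj.2 h
      have hf : (decide (ii ≤ jj)) = false := by simp; omega
      simp only [List.foldl_cons, hc, if_true, List.filter_cons, hf]
      exact ih st hnd.of_cons (fun j hj => hmem j (by simp [hj]))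
    · have hc : st.2.contains (jj, ii) = false := by
        rw [Bool.eq_false_iff]
        intro hcc
        exact h (hjj.1 (by simpa using hcc))
      have ht : (decide (ii ≤ jj)) = true := by simp; omega
      have hmem' : ∀ j ∈ L, ((j, ii) ∈ (st.2 ++ [(ii, jj)]) ↔ j < ii) := by
        intro j hj
        constructor
        · intro hm
          rcases List.mem_append.1 hm with hm | hm
          · exact (hmem j (by simp [hj])).1 hm
          · simp at hm
            have hjeq : j = jj := by omega
            exact absurd (hjeq ▸ hj) (List.nodup_cons.1 hnd).1
        · intro hl
          exact List.mem_append.2 (Or.inl ((hmem j (by simp [hj])).2 hl))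
      simp only [List.foldl_cons, hc, Bool.false_eq_true, if_false, List.filter_cons, ht,
        if_true, List.map_cons]
      rw [ih (st.1 ++ ["grad2_" ++ PySem.Int.toStr ii ++ "_" ++ PySem.Int.toStr jj ++ "_" ++ curr],
        st.2 ++ [(ii, jj)]) hnd.of_cons hmem']
      simp [cgvS2]

-- collected-set characterisation: (jj, k) with 0 ≤ jj lies in the pairs gathered from
-- the first k full rows iff jj < k (given k < n)
lemma cgv_collected_mem (n : Int) (k : Nat) (hkn : (k : Int) < n) (jj : Int) (hjj : 0 ≤ jj) :
    ((jj, (k : Int)) ∈ (PySem.List.pyRange 0 (k : Int) 1).flatMap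
        (fun ii => (PySem.List.pyRange ii n 1).map (fun b => (ii, b))) ↔ jj < (k : Int)) := by
  constructor
  · intro hm
    rcases List.mem_flatMap.1 hm with ⟨ii, hii, hmm⟩
    rcases List.mem_map.1 hmm with ⟨b, _, hb⟩
    have h1 := (PySem.List.mem_pyRange_one).1 hii
    simp only [Prod.mk.injEq] at hb
    obtain ⟨h2, h3⟩ := hb
    omega
  · intro hlt
    apply List.mem_flatMap.2
    refine ⟨jj, PySem.List.mem_pyRange_one.2 ⟨hjj, hlt⟩, ?_⟩
    exact List.mem_map.2 ⟨(k : Int), PySem.List.mem_pyRange_one.2 ⟨by omega, hkn⟩, rfl⟩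

-- A's symmetric grad2 loop over the first k rows, in closed form
lemma cgvA_rows_sym (curr : String) (n : Int) :
    ∀ (k : Nat), (k : Int) ≤ n → ∀ (gv : List String),
      (PySem.List.pyRange 0 (k : Int) 1).foldl (cgvA_grad2_row curr true n)
          (gv, ([] : List (Int × Int)))
        = (gv ++ (PySem.List.pyRange 0 (k : Int) 1).flatMap
              (fun ii => (PySem.List.pyRange ii n 1).map (cgvS2 curr ii)),
           (PySem.List.pyRange 0 (k : Int) 1).flatMap
              (fun ii => (PySem.List.pyRange ii n 1).map (fun b => (ii, b)))) := by
  intro k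
  induction k with
  | zero => intro _ gv; simp
  | succ k ih =>
    intro hkn gv
    have hk : (k : Int) ≤ n := by push_cast at hkn ⊢; omega
    have hklt : (k : Int) < n := by push_cast at hkn ⊢; omega
    have hsplit : ((k + 1 : Nat) : Int) = (k : Int) + 1 := by push_cast; ring
    rw [hsplit, PySem.List.pyRange_one_succ_right (by positivity), List.foldl_append,
      ih hk gv, List.foldl_cons, List.foldl_nil]
    have hmemc : ∀ jj ∈ PySem.List.pyRange 0 n 1,
        ((jj, (k : Int)) ∈ (PySem.List.pyRange 0 (k : Int) 1).flatMap
            (fun ii => (PySem.List.pyRange ii n 1).map (fun b => (ii, b))) ↔ jj < (k : Int)) := by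
      intro jj hjj
      have hb := (PySem.List.mem_pyRange_one).1 hjj
      exact cgv_collected_mem n k hklt jj hb.1
    unfold cgvA_grad2_row
    simp only [Bool.true_and]
    rw [cgvA_inner_sym curr (k : Int) (PySem.List.pyRange 0 n 1)
      _ (PySem.List.nodup_pyRange_one 0 n) hmemc]
    rw [filter_pyRange_le (k : Int) n (by positivity) hk, List.flatMap_append,
      List.flatMap_append]
    simp

-- cast-normalised range: pyRange 0 ↑n.toNat 1 = pyRange 0 n 1
lemma pyRange_toNat (n : Int) :
    PySem.List.pyRange 0 ((n.toNat : Nat) : Int) 1 = PySem.List.pyRange 0 n 1 := by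
  by_cases h : 0 ≤ n
  · rw [Int.toNat_of_nonneg h]
  · have h1 : PySem.List.pyRange 0 n 1 = [] := PySem.List.pyRange_one_eq_nil (by omega)
    have h2 : PySem.List.pyRange 0 ((n.toNat : Nat) : Int) 1 = [] :=
      PySem.List.pyRange_one_eq_nil (by simp [Int.toNat_of_nonpos (by omega : n ≤ 0)])
    rw [h1, h2]

-- the per-variable grad2 result of A equals B's, for both symmetry flags
lemma cgvA_var_eq (curr : String) (n : Int) (sym : Bool) (gv : List String) :
    ((PySem.List.pyRange 0 n 1).foldl (cgvA_grad2_row curr sym n)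
        (gv, ([] : List (Int × Int)))).1
      = gv ++ cgvB_var curr sym n := by
  cases sym with
  | true =>
    by_cases hn : 0 ≤ n
    · rw [← pyRange_toNat n, cgvA_rows_sym curr n n.toNat (by omega) gv]
      simp only [cgvB_var, if_true, pyRange_toNat]
    · rw [PySem.List.pyRange_one_eq_nil (by omega)]
      simp [cgvB_var, PySem.List.pyRange_one_eq_nil (show n ≤ (0:Int) by omega)]
  | false =>
    have hstep : cgvA_grad2_row curr false n
        = fun st ii => (st.1 ++ (PySem.List.pyRange 0 n 1).map
              (fun jj => "grad2_" ++ PySem.Int.toStr ii ++ "_" ++ PySem.Int.toStr jj ++ "_" ++ curr),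
                        st.2 ++ (PySem.List.pyRange 0 n 1).map (fun b => (ii, b))) := by
      funext st ii
      unfold cgvA_grad2_row
      simp only [Bool.false_and, Bool.false_eq_true, if_false]
      rw [foldl_pair_append_singleton
        (fun jj => "grad2_" ++ PySem.Int.toStr ii ++ "_" ++ PySem.Int.toStr jj ++ "_" ++ curr)
        (fun jj => (ii, jj)) (PySem.List.pyRange 0 n 1) st]
    rw [hstep, foldl_pair_append]
    simp [cgvB_var, cgvS2]

-- ===== VERDICT (by name: the statement is the Claim_ definition above) =====
theorem create_grad_var_names_spec : Claim_equal_create_grad_var_names := by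
  intro in_vars grad_type ndim sym _
  unfold Spec_create_grad_var_names create_grad_var_names create_grad_var_names_alt
  by_cases h1 : grad_type = "grad"
  · simp only [h1, if_true]
    rw [show (fun (gv : List String) curr =>
        (PySem.List.pyRange 0 ndim 1).foldl (fun gv ii =>
          gv ++ ["grad_" ++ PySem.Int.toStr ii ++ "_" ++ curr]) gv)
      = fun gv curr => gv ++ (PySem.List.pyRange 0 ndim 1).map
          (fun ii => "grad_" ++ PySem.Int.toStr ii ++ "_" ++ curr) from
      funext fun gv => funext fun curr =>
        PySem.List.foldl_append_singleton_eq_map _ _ gv]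
    rw [PySem.List.foldl_append_eq_flatMap]
    simp
  by_cases h2 : grad_type = "grad2"
  · simp only [h2, if_true]
    rw [show (fun (gv : List String) curr =>
        ((PySem.List.pyRange 0 ndim 1).foldl (cgvA_grad2_row curr sym ndim)
          (gv, ([] : List (Int × Int)))).1)
      = fun gv curr => gv ++ cgvB_var curr sym ndim from
      funext fun gv => funext fun curr => cgvA_var_eq curr ndim sym gv]
    rw [PySem.List.foldl_append_eq_flatMap]
    simp [cgvB_var, cgvS2]
  by_cases h3 : grad_type = "agrad"
  · simp only [h3, if_true]
    rw [show (fun (gv : List String) curr =>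
        (PySem.List.pyRange 0 ndim 1).foldl (fun gv ii =>
          gv ++ ["agrad_" ++ PySem.Int.toStr ii ++ "_" ++ curr]) gv)
      = fun gv curr => gv ++ (PySem.List.pyRange 0 ndim 1).map
          (fun ii => "agrad_" ++ PySem.Int.toStr ii ++ "_" ++ curr) from
      funext fun gv => funext fun curr =>
        PySem.List.foldl_append_singleton_eq_map _ _ gv]
    rw [PySem.List.foldl_append_eq_flatMap]
    simp
  · simp [h1, h2, h3]
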